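-- pv_equiv track=rewrite | github.com/ricoferdian/Information-Retrieval-System | tfidfbackend_query.py | calc_document_frequency
-- ===== SOURCE A (Python) =====
-- def calc_document_frequency(tf_matrix, queries):
--     df_matrix = {}
--     for query in queries:
--         count = 0
--         for f_table in tf_matrix.values():
--             if query in f_table.keys():
--                 count+=1
--         df_matrix[query] = count
--
--     return df_matrix
-- ===== SOURCE B (Python) =====
-- def calc_document_frequency(tf_matrix, queries):
--     # Build an inverted document-frequency index in one pass over the documents,
--     # then read each query's count from it.
--     freq = {}
--     for f_table in tf_matrix.values():
--         for term in f_table: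
--             freq[term] = freq.get(term, 0) + 1
--     return {query: freq.get(query, 0) for query in queries}
-- ===== Notes on version B (the rewrite author's own statement) =====
-- stated objective: faster
-- what changed: Flips the loop nesting: instead of rescanning every document's key set once per query, B makes a single pass over the documents building an inverted frequency index, then answers each query by one dictionary lookup.
import Mathlib
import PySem

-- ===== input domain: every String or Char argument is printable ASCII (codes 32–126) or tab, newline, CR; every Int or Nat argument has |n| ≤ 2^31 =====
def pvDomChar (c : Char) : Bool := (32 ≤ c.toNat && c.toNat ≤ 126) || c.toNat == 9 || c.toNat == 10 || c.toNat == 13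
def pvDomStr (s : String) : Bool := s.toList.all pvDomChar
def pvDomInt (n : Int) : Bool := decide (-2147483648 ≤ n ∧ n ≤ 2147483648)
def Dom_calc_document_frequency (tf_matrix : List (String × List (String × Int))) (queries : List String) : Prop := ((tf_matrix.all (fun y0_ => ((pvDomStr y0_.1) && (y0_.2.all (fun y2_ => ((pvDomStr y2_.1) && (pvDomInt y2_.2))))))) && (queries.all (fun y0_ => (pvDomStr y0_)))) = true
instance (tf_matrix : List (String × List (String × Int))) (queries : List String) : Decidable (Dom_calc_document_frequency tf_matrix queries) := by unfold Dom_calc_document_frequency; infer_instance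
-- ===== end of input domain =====

-- B builds a term→document-frequency index in ONE pass over the documents and then answers
-- each query by a lookup, instead of A's per-query rescan of every document's key set.

-- ===== PORT A =====
-- df_matrix = {}; for query: count = 0; for f_table in values(): if query in keys(): count += 1; df[query] = count
def calc_document_frequency (tf_matrix : List (String × List (String × Int))) (queries : List String) : List (String × Int) :=
  (queries.foldl (fun df_matrix query =>
      df_matrix.insert query
        (tf_matrix.foldl (fun count f_table =>
            if (f_table.2.map (·.1)).contains query then count + 1 else count) (0 : Int)))
    PySem.Dict.empty).items

-- ===== PORT B =====
-- freq = {}; for f_table in values(): for term in f_table: freq[term] = freq.get(term,0)+1;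
-- return {q: freq.get(q, 0) for q in queries}
def calc_document_frequency_alt (tf_matrix : List (String × List (String × Int))) (queries : List String) : List (String × Int) :=
  let freq : PySem.Dict String Int :=
    tf_matrix.foldl (fun freq f_table =>
        f_table.2.foldl (fun freq p => freq.modify p.1 0 (· + 1)) freq)
      PySem.Dict.empty
  (queries.foldl (fun df query => df.insert query (freq.getD query 0)) PySem.Dict.empty).items

-- ===== PRECONDITION & SPEC =====
-- Pre_ only states that the association lists encode Python dicts: each document's key list is
-- duplicate-free (every input the Python programs can actually receive satisfies this; a list with
-- duplicate keys does not denote any Python dict, so A is never run on one).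
def Pre_calc_document_frequency (tf_matrix : List (String × List (String × Int))) (queries : List String) : Prop :=
  ∀ f_table ∈ tf_matrix, (f_table.2.map (·.1)).Nodup
instance (tf_matrix : List (String × List (String × Int))) (queries : List String) : Decidable (Pre_calc_document_frequency tf_matrix queries) := by unfold Pre_calc_document_frequency; infer_instance
def pvWitness_calc_document_frequency : (List (String × List (String × Int))) × List String :=
  ([("d1", [("a", 1), ("b", 2)]), ("d2", [("a", 3)])], ["a", "b", "c"])

def Spec_calc_document_frequency (tf_matrix : List (String × List (String × Int))) (queries : List String) (out : List (String × Int)) : Prop := out = calc_document_frequency_alt tf_matrix queries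
instance (tf_matrix : List (String × List (String × Int))) (queries : List String) (out : List (String × Int)) : Decidable (Spec_calc_document_frequency tf_matrix queries out) := by unfold Spec_calc_document_frequency; infer_instance

-- ===== CLAIM (what is proved, stated in full; the proofs are below) =====
def Claim_equal_calc_document_frequency : Prop := ∀ (tf_matrix : List (String × List (String × Int))) (queries : List String), Dom_calc_document_frequency tf_matrix queries → Pre_calc_document_frequency tf_matrix queries → Spec_calc_document_frequency tf_matrix queries (calc_document_frequency tf_matrix queries)

-- ===== LEMMAS AND PROOFS =====

-- the value B's index holds for q equals A's per-query count over the documents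
theorem freq_getD_eq (tf_matrix : List (String × List (String × Int))) (q : String)
    (d : PySem.Dict String Int)
    (h : ∀ f_table ∈ tf_matrix, (f_table.2.map (·.1)).Nodup) :
    (tf_matrix.foldl (fun freq f_table =>
        f_table.2.foldl (fun freq p => freq.modify p.1 0 (· + 1)) freq) d).getD q 0
      = tf_matrix.foldl (fun count f_table =>
          if (f_table.2.map (·.1)).contains q then count + 1 else count) (d.getD q 0) := by
  induction tf_matrix generalizing d with
  | nil => rfl
  | cons doc tl ih =>
      have hdoc := h doc (List.mem_cons_self ..)
      have htl : ∀ f_table ∈ tl, (f_table.2.map (·.1)).Nodup :=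
        fun f hf => h f (List.mem_cons_of_mem _ hf)
      simp only [List.foldl_cons]
      rw [ih _ htl]
      congr 1
      have : doc.2.foldl (fun freq p => freq.modify p.1 0 (· + 1)) d
          = (doc.2.map (·.1)).foldl (fun freq k => freq.modify k 0 (· + 1)) d := by
        rw [List.foldl_map]
      rw [this, PySem.Dict.getD_foldl_modify_add_one]
      by_cases hq : q ∈ doc.2.map (·.1)
      · rw [List.count_eq_one_of_mem hdoc hq]
        obtain ⟨p, hp, he⟩ := List.mem_map.mp hq
        simpa using ⟨p.2, by rw [← he, Prod.mk.eta]; exact hp⟩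
      · rw [List.count_eq_zero_of_not_mem hq]
        simp [hq]

theorem calc_document_frequency_spec : Claim_equal_calc_document_frequency := by
  intro tf_matrix queries _ hpre
  unfold Spec_calc_document_frequency calc_document_frequency calc_document_frequency_alt
  have hval : ∀ q : String,
      tf_matrix.foldl (fun count f_table =>
          if (f_table.2.map (·.1)).contains q then count + 1 else count) (0 : Int)
        = (tf_matrix.foldl (fun freq f_table =>
            f_table.2.foldl (fun freq p => freq.modify p.1 0 (· + 1)) freq)
            PySem.Dict.empty).getD q 0 := by
    intro q
    rw [freq_getD_eq tf_matrix q PySem.Dict.empty hpre, PySem.Dict.getD_empty]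
  -- the two outer query loops insert equal values, so the resulting dicts are equal
  simp only [hval]
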